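-- pv_equiv track=rewrite | github.com/qedrohenrique/tg-2024 | grafos.py | simple_path_adj_list
-- ===== SOURCE A (Python) =====
-- def simple_path_adj_list(graph, start, end, path=[]):
--     path = path + [start]
--
--     if start == end:
--         return path
--
--     if start not in graph:
--         return None
--
--     for vertex in graph[start]:
--         if vertex not in path:
--             extended_path = simple_path_adj_list(graph, vertex, end, path)
--             if extended_path:
--                 return extended_path
--
--     return None
-- ===== SOURCE B (Python) =====
-- def simple_path_adj_list(graph, start, end, path=[]):
--     stack = [(start, list(path))]
--     while stack:
--         v, p = stack.pop()
--         p = p + [v]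
--         if v == end:
--             return p
--         if v in graph:
--             for w in reversed(graph[v]):
--                 if w not in p:
--                     stack.append((w, p))
--     return None
-- ===== Notes on version B (the rewrite author's own statement) =====
-- stated objective: alternative
-- what changed: A is a recursive DFS that calls itself per neighbour; B replaces the recursion by an iterative loop over an explicit stack of (vertex, path) frames, pushing filtered neighbours in reverse so the same first DFS simple path is popped; same values, different control structure.
import Mathlib
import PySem

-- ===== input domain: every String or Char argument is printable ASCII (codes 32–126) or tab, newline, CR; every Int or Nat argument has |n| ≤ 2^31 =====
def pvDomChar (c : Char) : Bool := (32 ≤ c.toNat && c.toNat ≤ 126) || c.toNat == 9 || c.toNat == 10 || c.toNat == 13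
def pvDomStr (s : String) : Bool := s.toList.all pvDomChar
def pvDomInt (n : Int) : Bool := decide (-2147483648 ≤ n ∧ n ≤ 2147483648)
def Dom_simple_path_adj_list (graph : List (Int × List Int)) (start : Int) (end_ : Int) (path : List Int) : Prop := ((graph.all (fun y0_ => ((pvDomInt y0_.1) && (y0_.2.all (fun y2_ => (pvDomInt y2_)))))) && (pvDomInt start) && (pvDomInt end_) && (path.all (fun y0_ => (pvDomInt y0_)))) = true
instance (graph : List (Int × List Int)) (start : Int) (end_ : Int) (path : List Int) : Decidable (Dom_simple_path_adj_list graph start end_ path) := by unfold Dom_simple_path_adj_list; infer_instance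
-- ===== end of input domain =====

-- B replaces A's per-neighbour recursion by an iterative loop over an explicit stack of
-- (vertex, path) frames (neighbours pushed filtered and reversed), returning the same first
-- DFS simple path; alternative decomposition (recursive -> iterative), same asymptotic cost.


-- all neighbour values of the graph (used only to size the totality fuel of both ports)
def pvAllNbrs (graph : List (Int × List Int)) : List Int := graph.flatMap (fun kv => kv.2)

-- ===== PORT A =====
-- fuel is a totality guard only (outer `none` = fuel ran out; proved unreachable below):
-- every nested call adds a fresh vertex drawn from the neighbour lists to the path.
def pvGoA (graph : List (Int × List Int)) (end_ : Int) : Nat → Int → List Int → Option (Option (List Int))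
  | 0, _, _ => none
  | d + 1, start, path =>
    let path := path ++ [start]
    if start = end_ then some (some path)
    else
      match (PySem.Dict.mk graph).get? start with
      | none => some none
      | some nbrs =>
        nbrs.foldl (fun acc vertex =>
          match acc with
          | none => none
          | some (some r) => some (some r)
          | some none =>
            if vertex ∈ path then some none
            else
              match pvGoA graph end_ d vertex path with
              | none => none
              | some (some q) => if q = [] then some none else some (some q)  -- `if extended_path:` truthiness
              | some none => some none) (some none)

def simple_path_adj_list (graph : List (Int × List Int)) (start : Int) (end_ : Int) (path : List Int) : Option (List Int) :=
  match pvGoA graph end_ ((pvAllNbrs graph).dedup.length + 1) start path with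
  | some r => r
  | none => none

-- ===== PORT B =====
-- iterative DFS over an explicit stack (head = top); fuel counts loop iterations, a totality
-- guard only (outer `none` = fuel ran out; proved unreachable below).
def pvLoopB (graph : List (Int × List Int)) (end_ : Int) : Nat → List (Int × List Int) → Option (Option (List Int))
  | 0, _ => none
  | _ + 1, [] => some none
  | f + 1, (v, p0) :: rest =>
    let p := p0 ++ [v]
    if v = end_ then some (some p)
    else
      match (PySem.Dict.mk graph).get? v with
      | none => pvLoopB graph end_ f rest
      | some nbrs =>
        pvLoopB graph end_ f (nbrs.reverse.foldl (fun st w => if w ∈ p then st else (w, p) :: st) rest)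

def simple_path_adj_list_alt (graph : List (Int × List Int)) (start : Int) (end_ : Int) (path : List Int) : Option (List Int) :=
  match pvLoopB graph end_ (((pvAllNbrs graph).length + 1) ^ ((pvAllNbrs graph).dedup.length + 1) + 1) [(start, path)] with
  | some r => r
  | none => none

-- ===== PRECONDITION & SPEC =====
def Spec_simple_path_adj_list (graph : List (Int × List Int)) (start : Int) (end_ : Int) (path : List Int) (out : Option (List Int)) : Prop := out = simple_path_adj_list_alt graph start end_ path
instance (graph : List (Int × List Int)) (start : Int) (end_ : Int) (path : List Int) (out : Option (List Int)) : Decidable (Spec_simple_path_adj_list graph start end_ path out) := by unfold Spec_simple_path_adj_list; infer_instance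

-- ===== CLAIM (what is proved, stated in full; the proofs are below) =====
def Claim_equal_simple_path_adj_list : Prop := ∀ (graph : List (Int × List Int)) (start : Int) (end_ : Int) (path : List Int), Dom_simple_path_adj_list graph start end_ path → Spec_simple_path_adj_list graph start end_ path (simple_path_adj_list graph start end_ path)

-- ===== LEMMAS AND PROOFS =====

-- named copy of A's fold step, for stating lemmas
def pvStepA (graph : List (Int × List Int)) (end_ : Int) (d : Nat) (path : List Int)
    (acc : Option (Option (List Int))) (vertex : Int) : Option (Option (List Int)) :=
  match acc with
  | none => none
  | some (some r) => some (some r)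
  | some none =>
    if vertex ∈ path then some none
    else
      match pvGoA graph end_ d vertex path with
      | none => none
      | some (some q) => if q = [] then some none else some (some q)
      | some none => some none

-- unfolding A's port at successor fuel, with the fold step named
theorem pvGoA_succ (graph : List (Int × List Int)) (end_ : Int) (d : Nat) (v : Int) (p : List Int) :
    pvGoA graph end_ (d + 1) v p =
      (if v = end_ then some (some (p ++ [v]))
       else
        match (PySem.Dict.mk graph).get? v with
        | none => some none
        | some nbrs => nbrs.foldl (pvStepA graph end_ d (p ++ [v])) (some none)) := rfl

-- A's fold: `none` (fuel out) is absorbing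
theorem pvStepNone (graph : List (Int × List Int)) (end_ : Int) (d : Nat) (p : List Int) (l : List Int) :
    l.foldl (pvStepA graph end_ d p) none = none := by
  induction l with
  | nil => rfl
  | cons w t ih => simpa [pvStepA] using ih

-- A's fold: a found path is kept
theorem pvStepSome (graph : List (Int × List Int)) (end_ : Int) (d : Nat) (p : List Int) (l : List Int) (r : List Int) :
    l.foldl (pvStepA graph end_ d p) (some (some r)) = some (some r) := by
  induction l with
  | nil => rfl
  | cons w t ih => simpa [pvStepA] using ih

-- vertices already on the path are skipped: A's fold only depends on the filtered list
theorem pvFoldFilter (graph : List (Int × List Int)) (end_ : Int) (d : Nat) (p : List Int) (l : List Int)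
    (a : Option (Option (List Int))) :
    l.foldl (pvStepA graph end_ d p) a
      = (l.filter (fun w => decide (w ∉ p))).foldl (pvStepA graph end_ d p) a := by
  induction l generalizing a with
  | nil => rfl
  | cons w t ih =>
    by_cases hw : w ∈ p
    · have hstep : pvStepA graph end_ d p a w = a := by
        rcases a with _ | (_ | r) <;> simp [pvStepA, hw]
      simp [hw, List.foldl_cons, hstep, ih]
    · simp [hw, List.foldl_cons, ih]

-- B's reversed push loop builds (filtered neighbours, in order) on top of the old stack
theorem pvPush (p : List Int) (rest : List (Int × List Int)) (nbrs : List Int) :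
    nbrs.reverse.foldl (fun st w => if w ∈ p then st else (w, p) :: st) rest
      = (nbrs.filter (fun w => decide (w ∉ p))).map (fun w => (w, p)) ++ rest := by
  rw [List.foldl_reverse]
  induction nbrs with
  | nil => rfl
  | cons w t ih =>
    by_cases hw : w ∈ p <;> simp [List.foldr_cons, hw, ih]

-- lookup in the graph dict returns one of the stored neighbour lists
theorem pvGetMem (graph : List (Int × List Int)) (v : Int) (nbrs : List Int)
    (h : (PySem.Dict.mk graph).get? v = some nbrs) :
    (∀ w ∈ nbrs, w ∈ pvAllNbrs graph) ∧ nbrs.length ≤ (pvAllNbrs graph).length := by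
  induction graph with
  | nil => simp [PySem.Dict.get?] at h
  | cons kv t ih =>
    obtain ⟨k, l⟩ := kv
    rw [PySem.Dict.get?_mk_cons] at h
    split at h
    · obtain rfl : l = nbrs := by injection h
      refine ⟨fun w hw => ?_, ?_⟩
      · simp only [pvAllNbrs, List.flatMap_cons, List.mem_append]
        exact Or.inl hw
      · simp only [pvAllNbrs, List.flatMap_cons, List.length_append]
        omega
    · obtain ⟨h1, h2⟩ := ih h
      refine ⟨fun w hw => ?_, ?_⟩
      · simp only [pvAllNbrs, List.flatMap_cons, List.mem_append]
        exact Or.inr (h1 w hw)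
      · simp only [pvAllNbrs, List.flatMap_cons, List.length_append] at h2 ⊢
        omega

-- A never returns an empty path: the fold's accumulator never holds `some (some [])`
theorem pvFoldNeNil (graph : List (Int × List Int)) (end_ : Int) (d : Nat) (p : List Int)
    (q : List Int) :
    ∀ (l : List Int) (a : Option (Option (List Int))),
      l.foldl (pvStepA graph end_ d p) a = some (some q) → (a = some (some q) → q ≠ []) → q ≠ [] := by
  intro l
  induction l with
  | nil => intro a h ha; exact ha h
  | cons w t ih =>
    intro a h ha
    refine ih (pvStepA graph end_ d p a w) h ?_
    intro hstep
    rcases a with _ | (_ | r)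
    · simp [pvStepA] at hstep
    · simp only [pvStepA] at hstep
      by_cases hw : w ∈ p
      · rw [if_pos hw] at hstep; simp at hstep
      · rw [if_neg hw] at hstep
        cases hgo : pvGoA graph end_ d w p with
        | none => rw [hgo] at hstep; simp at hstep
        | some r =>
          rw [hgo] at hstep
          cases r with
          | none => simp at hstep
          | some q' =>
            by_cases hq : q' = []
            · simp [hq] at hstep
            · simp [hq] at hstep
              exact hstep ▸ hq
    · exact ha hstep

theorem pvGoA_ne_nil (graph : List (Int × List Int)) (end_ : Int) (d : Nat) (v : Int)
    (p q : List Int) (h : pvGoA graph end_ d v p = some (some q)) : q ≠ [] := by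
  cases d with
  | zero => simp [pvGoA] at h
  | succ d =>
    rw [pvGoA_succ] at h
    split at h
    · obtain rfl : p ++ [v] = q := Option.some.inj (Option.some.inj h)
      simp
    · split at h
      · simp at h
      · exact pvFoldNeNil graph end_ d (p ++ [v]) q _ (some none) h (by simp)

-- A's fold never runs out of fuel if no reachable child does
theorem pvFoldSuff (graph : List (Int × List Int)) (end_ : Int) (d : Nat) (p : List Int) :
    ∀ (l : List Int) (a : Option (Option (List Int))), a ≠ none →
      (∀ w ∈ l, w ∉ p → ∃ r, pvGoA graph end_ d w p = some r) →
      l.foldl (pvStepA graph end_ d p) a ≠ none := by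
  intro l
  induction l with
  | nil => intro a ha _; exact ha
  | cons w t ih =>
    intro a ha hch
    refine ih (pvStepA graph end_ d p a w) ?_ (fun x hx => hch x (List.mem_cons_of_mem _ hx))
    rcases a with _ | (_ | r)
    · exact absurd rfl ha
    · simp only [pvStepA]
      by_cases hw : w ∈ p
      · simp [hw]
      · obtain ⟨r, hr⟩ := hch w List.mem_cons_self hw
        rw [if_neg hw, hr]
        rcases r with _ | q
        · simp
        · by_cases hq : q = [] <;> simp [hq]
    · simp [pvStepA]

-- A's fuel suffices: measure = distinct neighbour values not yet on the path
theorem pvSuffA (graph : List (Int × List Int)) (end_ : Int) :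
    ∀ (d : Nat) (v : Int) (p : List Int),
      ((pvAllNbrs graph).dedup.filter (fun x => decide (x ∉ p ++ [v]))).length < d →
      ∃ r, pvGoA graph end_ d v p = some r := by
  intro d
  induction d with
  | zero => intro v p h; omega
  | succ d ih =>
    intro v p h
    rw [pvGoA_succ]
    split
    · exact ⟨_, rfl⟩
    · split
      · exact ⟨_, rfl⟩
      · rename_i nbrs hget
        have hch : ∀ w ∈ nbrs, w ∉ p ++ [v] → ∃ r, pvGoA graph end_ d w (p ++ [v]) = some r := by
          intro w hw hwp
          apply ih
          have hwA : w ∈ (pvAllNbrs graph).dedup := List.mem_dedup.mpr ((pvGetMem graph v nbrs hget).1 w hw)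
          have hsub : ((pvAllNbrs graph).dedup.filter (fun x => decide (x ∉ (p ++ [v]) ++ [w]))).length
              < ((pvAllNbrs graph).dedup.filter (fun x => decide (x ∉ p ++ [v]))).length := by
            have heq : (pvAllNbrs graph).dedup.filter (fun x => decide (x ∉ (p ++ [v]) ++ [w]))
                = ((pvAllNbrs graph).dedup.filter (fun x => decide (x ∉ p ++ [v]))).filter (fun x => decide (x ≠ w)) := by
              rw [List.filter_filter]
              apply List.filter_congr
              intro x _
              have hiff : (x ∉ (p ++ [v]) ++ [w]) ↔ ((x ∉ p ++ [v]) ∧ x ≠ w) := by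
                constructor
                · intro hx
                  exact ⟨fun hc => hx (List.mem_append_left _ hc),
                         fun hc => hx (List.mem_append_right _ (by simp [hc]))⟩
                · rintro ⟨hx1, hx2⟩ hc
                  rcases List.mem_append.mp hc with hc1 | hc2
                  · exact hx1 hc1
                  · exact hx2 (by simpa using hc2)
              rw [decide_eq_decide.mpr hiff, Bool.decide_and, Bool.and_comm]
            rw [heq]
            apply List.length_filter_lt_length_iff_exists.mpr
            exact ⟨w, List.mem_filter.mpr ⟨hwA, by simpa using hwp⟩, by simp⟩
          omega
        have hne := pvFoldSuff graph end_ d (p ++ [v]) nbrs (some none) (by simp) hch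
        cases hfold : nbrs.foldl (pvStepA graph end_ d (p ++ [v])) (some none) with
        | none => exact absurd hfold hne
        | some r => exact ⟨r, rfl⟩

-- the chain step of the simulation: a block of sibling frames on B's stack behaves like A's fold
theorem pvChain (graph : List (Int × List Int)) (end_ : Int) (d : Nat)
    (IH : ∀ (v : Int) (p : List Int) (rA : Option (List Int)),
      pvGoA graph end_ d v p = some rA →
      ∃ n, n ≤ ((pvAllNbrs graph).length + 1) ^ d ∧
        ∀ (f : Nat) (rest : List (Int × List Int)),
          pvLoopB graph end_ (n + f) ((v, p) :: rest)
            = (match rA with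
               | some q => some (some q)
               | none => pvLoopB graph end_ f rest)) :
    ∀ (C : List Int) (p' : List Int) (rA : Option (List Int)),
      (∀ w ∈ C, w ∉ p') →
      C.foldl (pvStepA graph end_ d p') (some none) = some rA →
      ∃ n, n ≤ C.length * ((pvAllNbrs graph).length + 1) ^ d ∧
        ∀ (f : Nat) (rest : List (Int × List Int)),
          pvLoopB graph end_ (n + f) (C.map (fun w => (w, p')) ++ rest)
            = (match rA with
               | some q => some (some q)
               | none => pvLoopB graph end_ f rest) := by
  intro C
  induction C with
  | nil =>
    intro p' rA _ h
    obtain rfl : (none : Option (List Int)) = rA := Option.some.inj h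
    exact ⟨0, by simp, fun f rest => by simp⟩
  | cons w t ihc =>
    intro p' rA hCp h
    rw [List.foldl_cons] at h
    have hw : w ∉ p' := hCp w List.mem_cons_self
    cases hg : pvGoA graph end_ d w p' with
    | none =>
      have hstep2 : pvStepA graph end_ d p' (some none) w = none := by
        simp [pvStepA, hw, hg]
      rw [hstep2, pvStepNone] at h
      simp at h
    | some rw' =>
      cases rw' with
      | some q =>
        have hq : q ≠ [] := pvGoA_ne_nil graph end_ d w p' q hg
        have hstep2 : pvStepA graph end_ d p' (some none) w = some (some q) := by
          simp [pvStepA, hw, hg, hq]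
        rw [hstep2, pvStepSome] at h
        obtain rfl : some q = rA := by simpa using h
        obtain ⟨n1, hb1, hP1⟩ := IH w p' (some q) hg
        refine ⟨n1, ?_, ?_⟩
        · calc n1 ≤ ((pvAllNbrs graph).length + 1) ^ d := hb1
            _ ≤ (w :: t).length * ((pvAllNbrs graph).length + 1) ^ d :=
                Nat.le_mul_of_pos_left _ (by simp)
        · intro f rest
          have := hP1 f (t.map (fun w => (w, p')) ++ rest)
          simpa using this
      | none =>
        have hstep2 : pvStepA graph end_ d p' (some none) w = some none := by
          simp [pvStepA, hw, hg]
        rw [hstep2] at h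
        obtain ⟨n2, hb2, hP2⟩ := ihc p' rA (fun x hx => hCp x (List.mem_cons_of_mem _ hx)) h
        obtain ⟨n1, hb1, hP1⟩ := IH w p' none hg
        refine ⟨n1 + n2, ?_, ?_⟩
        · calc n1 + n2 ≤ ((pvAllNbrs graph).length + 1) ^ d + t.length * ((pvAllNbrs graph).length + 1) ^ d :=
              Nat.add_le_add hb1 hb2
            _ = (w :: t).length * ((pvAllNbrs graph).length + 1) ^ d := by
              simp [List.length_cons]; ring
        · intro f rest
          have h1 := hP1 (n2 + f) (t.map (fun w => (w, p')) ++ rest)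
          have h2 := hP2 f rest
          simp only [List.map_cons, List.cons_append, Nat.add_assoc]
          rw [h1]
          exact h2

-- simulation: processing one frame of B's stack runs A's recursion on it
theorem pvSim (graph : List (Int × List Int)) (end_ : Int) :
    ∀ (d : Nat) (v : Int) (p : List Int) (rA : Option (List Int)),
      pvGoA graph end_ d v p = some rA →
      ∃ n, n ≤ ((pvAllNbrs graph).length + 1) ^ d ∧
        ∀ (f : Nat) (rest : List (Int × List Int)),
          pvLoopB graph end_ (n + f) ((v, p) :: rest)
            = (match rA with
               | some q => some (some q)
               | none => pvLoopB graph end_ f rest) := by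
  intro d
  induction d with
  | zero => intro v p rA h; simp [pvGoA] at h
  | succ d ih =>
    intro v p rA h
    rw [pvGoA_succ] at h
    by_cases hv : v = end_
    · rw [if_pos hv] at h
      obtain rfl : some (p ++ [v]) = rA := Option.some.inj h
      refine ⟨1, Nat.one_le_pow _ _ (by omega), ?_⟩
      intro f rest
      have h1 : 1 + f = f + 1 := by omega
      rw [h1]
      simp [pvLoopB, hv]
    · rw [if_neg hv] at h
      split at h
      · rename_i hget
        obtain rfl : (none : Option (List Int)) = rA := by simpa using h
        refine ⟨1, Nat.one_le_pow _ _ (by omega), ?_⟩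
        intro f rest
        have h1 : 1 + f = f + 1 := by omega
        rw [h1]
        simp [pvLoopB, hv, hget]
      · rename_i nbrs hget
        rw [pvFoldFilter] at h
        have hCp : ∀ w ∈ nbrs.filter (fun w => decide (w ∉ p ++ [v])), w ∉ p ++ [v] := by
          intro w hw
          simpa using List.of_mem_filter hw
        obtain ⟨n2, hb2, hP2⟩ := pvChain graph end_ d ih _ (p ++ [v]) rA hCp h
        have hC : (nbrs.filter (fun w => decide (w ∉ p ++ [v]))).length ≤ (pvAllNbrs graph).length :=
          le_trans (List.length_filter_le _ _) (pvGetMem graph v nbrs hget).2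
        have hX : 1 ≤ ((pvAllNbrs graph).length + 1) ^ d := Nat.one_le_pow _ _ (by omega)
        refine ⟨n2 + 1, ?_, ?_⟩
        · have hmul := Nat.mul_le_mul_right (((pvAllNbrs graph).length + 1) ^ d) hC
          have hpow : ((pvAllNbrs graph).length + 1) ^ (d + 1)
              = (pvAllNbrs graph).length * ((pvAllNbrs graph).length + 1) ^ d
                + ((pvAllNbrs graph).length + 1) ^ d := by
            rw [pow_succ]; ring
          omega
        · intro f rest
          have h1 : n2 + 1 + f = (n2 + f) + 1 := by omega
          rw [h1]
          show pvLoopB graph end_ ((n2 + f) + 1) ((v, p) :: rest) = _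
          simp only [pvLoopB, hget, if_neg hv]
          rw [pvPush]
          exact hP2 f rest

-- ===== VERDICT (by name: the statement is the Claim_ definition above) =====
theorem simple_path_adj_list_spec : Claim_equal_simple_path_adj_list := by
  intro graph start end_ path _
  unfold Spec_simple_path_adj_list simple_path_adj_list simple_path_adj_list_alt
  obtain ⟨rA, hA⟩ := pvSuffA graph end_ ((pvAllNbrs graph).dedup.length + 1) start path
    (Nat.lt_succ_of_le (List.length_filter_le _ _))
  obtain ⟨n, hb, hP⟩ := pvSim graph end_ ((pvAllNbrs graph).dedup.length + 1) start path rA hA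
  set FB := ((pvAllNbrs graph).length + 1) ^ ((pvAllNbrs graph).dedup.length + 1) + 1 with hFB
  have hf : n + (FB - n) = FB := by omega
  have hloop := hP (FB - n) []
  rw [hf] at hloop
  rw [hA, hloop]
  cases rA with
  | some q => rfl
  | none =>
    obtain ⟨k, hk⟩ : ∃ k, FB - n = k + 1 := ⟨FB - n - 1, by omega⟩
    rw [hk]
    rfl
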